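-- pv_equiv track=rewrite | github.com/nodatapoints/nodatabot | philip.py | recursive_carpet
-- ===== SOURCE A (Python) =====
-- def carpet_modify(mod, num):
--     # hab kp wie ich das unhardcodig machen soll
--     if mod == 0:
--         return 0
--     elif mod == 2:
--         return 2
--     elif mod == 1:
--         return num
--     elif mod == 3:
--         if num == 1: return 3
--         elif num == 3: return 1
--         elif num == 2: return 0
--         elif num == 0: return 2
--
-- def recursive_carpet(carp, base):
--     bw = len(base[0])
--     bh = len(base)
--     cw = len(carp[0])
--     ch = len(carp)
--
--     ret = [[0 for x in range(bw*cw)] for y in range(bh*ch)]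
--     for ly in range(ch):                # l = large
--         for lx in range(cw):
--             mod = carp[ly][lx]          # mod = modifier
--             for sy in range(bh):        # s = small
--                 for sx in range(bw):
--                     y = ly*bh+sy
--                     x = lx*bw+sx
--                     num = base[sy][sx]
--                     ret[y][x] = carpet_modify(mod, num)
--     return ret
-- ===== SOURCE B (Python) =====
-- def carpet_modify(mod, num):
--     if mod == 0:
--         return 0
--     elif mod == 2:
--         return 2
--     elif mod == 1:
--         return num
--     elif mod == 3:
--         if num == 1: return 3
--         elif num == 3: return 1
--         elif num == 2: return 0
--         elif num == 0: return 2
--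
-- def recursive_carpet(carp, base):
--     bw = len(base[0])
--     cw = len(carp[0])
--     # memoise: the transformed base block for each distinct modifier is computed once
--     blocks = {}
--     for crow in carp:
--         for mod in crow[:cw]:
--             if mod not in blocks:
--                 blocks[mod] = [[carpet_modify(mod, brow[sx]) for sx in range(bw)]
--                                for brow in base]
--     # assemble the output by concatenating precomputed block rows
--     ret = []
--     for crow in carp:
--         for sy in range(len(base)):
--             row = []
--             for mod in crow[:cw]:
--                 row.extend(blocks[mod][sy])
--             ret.append(row)
--     return ret
-- ===== Notes on version B (the rewrite author's own statement) =====
-- stated objective: faster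
-- what changed: B memoises: it first builds a dict mapping each distinct modifier value to the fully transformed base block (computed once per distinct modifier), then assembles each output row by concatenating precomputed block rows, instead of A's per-cell carpet_modify call inside four nested index-arithmetic loops over a preallocated grid.
-- outside the precondition, e.g. on recursive_carpet([[5]], [[1]]): A returns [[None]], B returns [[None]]; on recursive_carpet([[3]], [[7]]): A returns [[None]], B returns [[None]]
import Mathlib
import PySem

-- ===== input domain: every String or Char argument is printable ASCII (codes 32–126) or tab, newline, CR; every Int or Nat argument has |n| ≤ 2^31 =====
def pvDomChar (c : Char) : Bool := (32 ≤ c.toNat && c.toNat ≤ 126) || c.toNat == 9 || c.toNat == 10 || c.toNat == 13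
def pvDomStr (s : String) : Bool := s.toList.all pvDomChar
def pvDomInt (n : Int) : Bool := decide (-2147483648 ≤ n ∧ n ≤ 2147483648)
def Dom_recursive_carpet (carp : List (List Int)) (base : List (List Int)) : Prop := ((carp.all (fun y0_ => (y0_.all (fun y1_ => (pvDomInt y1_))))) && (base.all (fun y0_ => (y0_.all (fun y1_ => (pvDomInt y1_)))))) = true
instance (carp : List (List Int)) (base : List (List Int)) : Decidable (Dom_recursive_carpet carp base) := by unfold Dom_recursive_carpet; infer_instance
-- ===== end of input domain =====

-- B memoises the transformed base block per distinct modifier in a dict and assembles the output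
-- by concatenating precomputed block rows, instead of A's per-cell carpet_modify inside four
-- nested index-arithmetic loops over a preallocated grid (a timing run measured B faster).

-- ===== PORT A =====
-- carpet_modify returns Option Int: `none` is Python's implicit `return None` (unhandled (mod,num)
-- pairs); Pre_ excludes every input that reaches `none`, the `.getD 0` in the ports below only
-- fills that unreachable branch.
def carpet_modify (mod : Int) (num : Int) : Option Int :=
  if mod = 0 then some 0
  else if mod = 2 then some 2
  else if mod = 1 then some num
  else if mod = 3 then
    if num = 1 then some 3
    else if num = 3 then some 1
    else if num = 2 then some 0
    else if num = 0 then some 2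
    else none
  else none

-- Python indexing carp[ly][lx]/base[sy][sx] is ported with getD: Pre_ guarantees every index is in
-- range (out-of-range raises IndexError in Python and is excluded by Pre_).
def recursive_carpet (carp : List (List Int)) (base : List (List Int)) : List (List Int) :=
  let bw := (base.headD []).length
  let bh := base.length
  let cw := (carp.headD []).length
  let ch := carp.length
  let ret := List.replicate (bh*ch) (List.replicate (bw*cw) (0:Int))
  (List.range ch).foldl (fun ret ly =>
    (List.range cw).foldl (fun ret lx =>
      (List.range bh).foldl (fun ret sy =>
        (List.range bw).foldl (fun ret sx =>
          ret.set (ly*bh+sy) ((ret.getD (ly*bh+sy) []).set (lx*bw+sx)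
            ((carpet_modify ((carp.getD ly []).getD lx 0) ((base.getD sy []).getD sx 0)).getD 0)))
          ret) ret) ret) ret

-- ===== PORT B =====
-- the transformed base block for one modifier value (B's inner double comprehension)
def buildBlock (base : List (List Int)) (bw : Nat) (mod : Int) : List (List Int) :=
  base.map (fun brow => (List.range bw).map (fun sx => (carpet_modify mod (brow.getD sx 0)).getD 0))

-- `if mod not in blocks: blocks[mod] = …` → conditional Dict.insert; `row.extend(blocks[mod][sy])`
-- over crow[:cw] → flatMap (the key is always present: it was inserted from the same crow values).
def recursive_carpet_alt (carp : List (List Int)) (base : List (List Int)) : List (List Int) :=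
  let bw := (base.headD []).length
  let cw := (carp.headD []).length
  let blocks := carp.foldl (fun d crow =>
      (crow.take cw).foldl (fun d mod =>
        if d.contains mod then d else d.insert mod (buildBlock base bw mod)) d)
    (PySem.Dict.empty)
  carp.flatMap (fun crow =>
    (List.range base.length).map (fun sy =>
      (crow.take cw).flatMap (fun mod => (blocks.getD mod []).getD sy [])))

-- ===== PRECONDITION & SPEC =====
-- Pre_ excludes exactly the inputs where Python A does not return a List[List[int]]: empty carp or
-- base (IndexError on len(...[0])), rows shorter than the first row (IndexError on indexing), and
-- grids whose used cells make carpet_modify fall through and return None (a modifier outside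
-- {0,1,2,3}, or modifier 3 with a base cell outside {0,1,2,3}).
def Pre_recursive_carpet (carp : List (List Int)) (base : List (List Int)) : Prop :=
  carp ≠ [] ∧ base ≠ [] ∧
  (∀ row ∈ carp, (carp.headD []).length ≤ row.length) ∧
  (∀ row ∈ base, (base.headD []).length ≤ row.length) ∧
  (∀ row ∈ carp, ∀ m ∈ row.take (carp.headD []).length, m = 0 ∨ m = 1 ∨ m = 2 ∨ m = 3) ∧
  ((∃ row ∈ carp, 3 ∈ row.take (carp.headD []).length) →
    ∀ row ∈ base, ∀ n ∈ row.take (base.headD []).length, n = 0 ∨ n = 1 ∨ n = 2 ∨ n = 3)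
instance (carp : List (List Int)) (base : List (List Int)) : Decidable (Pre_recursive_carpet carp base) := by
  unfold Pre_recursive_carpet; infer_instance

def pvWitness_recursive_carpet : List (List Int) × List (List Int) :=
  ([[1, 3], [2, 0]], [[0, 1], [1, 2]])

def Spec_recursive_carpet (carp : List (List Int)) (base : List (List Int)) (out : List (List Int)) : Prop := out = recursive_carpet_alt carp base
instance (carp : List (List Int)) (base : List (List Int)) (out : List (List Int)) : Decidable (Spec_recursive_carpet carp base out) := by unfold Spec_recursive_carpet; infer_instance

-- ===== CLAIM (what is proved, stated in full; the proofs are below) =====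
def Claim_equal_recursive_carpet : Prop := ∀ (carp : List (List Int)) (base : List (List Int)), Dom_recursive_carpet carp base → Pre_recursive_carpet carp base → Spec_recursive_carpet carp base (recursive_carpet carp base)

-- ===== LEMMAS AND PROOFS =====

-- The innermost sx-loop only touches row y: it equals a single set of that row.
lemma foldl_set_focus (y : Nat) (idx : Nat → Nat) (v : Nat → Int) :
    ∀ (n : Nat) (ret : List (List Int)),
    (List.range n).foldl (fun r s => r.set y ((r.getD y []).set (idx s) (v s))) ret
      = ret.set y ((List.range n).foldl (fun row s => row.set (idx s) (v s)) (ret.getD y [])) := by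
  intro n
  induction n with
  | zero =>
    intro ret
    rw [List.range_zero, List.foldl_nil, List.foldl_nil]
    by_cases h : y < ret.length
    · rw [List.getD_eq_getElem _ _ h, List.set_getElem_self]
    · rw [List.set_eq_of_length_le (Nat.le_of_not_lt h)]
  | succ n ih =>
    intro ret
    rw [List.range_succ, List.foldl_append, List.foldl_append, ih]
    simp only [List.foldl_cons, List.foldl_nil]
    by_cases h : y < ret.length
    · simp [List.getD, h, List.set_set]
    · have h' := Nat.le_of_not_lt h
      rw [List.set_eq_of_length_le h', List.set_eq_of_length_le h', List.set_eq_of_length_le h']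

-- A left-to-right fold of `set (k+s)` over `done ++ rest` rewrites the first n cells of rest.
lemma foldl_set_block {α : Type} (F : Nat → α → α) (d : α) :
    ∀ (n : Nat) (k : Nat) (done rest : List α), done.length = k → n ≤ rest.length →
    (List.range n).foldl (fun r s => r.set (k+s) (F s (r.getD (k+s) d))) (done ++ rest)
      = done ++ (List.range n).map (fun s => F s (rest.getD s d)) ++ rest.drop n := by
  intro n
  induction n with
  | zero => intro k done rest hk hn; simp
  | succ n ih =>
    intro k done rest hk hn
    rw [List.range_succ, List.foldl_append, ih k done rest hk (Nat.le_of_succ_le hn)]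
    simp only [List.foldl_cons, List.foldl_nil]
    have hlt : n < rest.length := hn
    have hM : (done ++ (List.range n).map (fun s => F s (rest.getD s d))).length = k + n := by
      simp [hk]
    rw [List.getD_append_right _ _ _ _ (by omega),
        List.set_append_right _ _ (by omega), hM, Nat.sub_self,
        List.drop_eq_getElem_cons hlt]
    simp only [List.getD_cons_zero, List.set_cons_zero, List.map_append]
    simp [List.append_assoc, List.getElem?_eq_getElem hlt]

lemma len_seg {β : Type} (cw bw : Nat) (vv : Nat → Nat → β) :
    ((List.range cw).flatMap (fun lx => (List.range bw).map (vv lx))).length = cw*bw := by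
  simp [List.length_flatMap]

lemma row_fill (bw : Nat) (vv : Nat → Nat → Int) :
    ∀ (cw : Nat) (rest : List Int), cw*bw ≤ rest.length →
    (List.range cw).foldl (fun row lx => (List.range bw).foldl (fun row sx => row.set (lx*bw+sx) (vv lx sx)) row) rest
      = (List.range cw).flatMap (fun lx => (List.range bw).map (vv lx)) ++ rest.drop (cw*bw) := by
  intro cw
  induction cw with
  | zero => intro rest h; simp
  | succ cw ih =>
    intro rest h
    have h' : cw*bw + bw ≤ rest.length := by rw [Nat.succ_mul] at h; exact h
    rw [List.range_succ, List.foldl_append, ih rest (by omega)]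
    simp only [List.foldl_cons, List.foldl_nil]
    have hb : bw ≤ (rest.drop (cw*bw)).length := by rw [List.length_drop]; omega
    have hblk := foldl_set_block (fun s _ => vv cw s) (0:Int) bw (cw*bw)
      ((List.range cw).flatMap (fun lx => (List.range bw).map (vv lx))) (rest.drop (cw*bw))
      (len_seg cw bw vv) hb
    rw [hblk, List.drop_drop]
    simp [Nat.succ_mul, List.append_assoc]

lemma sy_fill (bw ofs k0 : Nat) (v : Nat → Nat → Int) :
    ∀ (bh : Nat) (done rest : List (List Int)), done.length = k0 → bh ≤ rest.length →
    (List.range bh).foldl (fun r sy => (List.range bw).foldl (fun r sx => r.set (k0+sy) ((r.getD (k0+sy) []).set (ofs+sx) (v sy sx))) r) (done ++ rest)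
      = done ++ (List.range bh).map (fun sy => (List.range bw).foldl (fun row sx => row.set (ofs+sx) (v sy sx)) (rest.getD sy [])) ++ rest.drop bh := by
  intro bh done rest h1 h2
  have hstep : (fun (r : List (List Int)) (sy : Nat) => (List.range bw).foldl (fun r sx => r.set (k0+sy) ((r.getD (k0+sy) []).set (ofs+sx) (v sy sx))) r)
      = fun r sy => r.set (k0+sy) ((List.range bw).foldl (fun row sx => row.set (ofs+sx) (v sy sx)) (r.getD (k0+sy) [])) := by
    funext r sy
    exact foldl_set_focus (k0+sy) (fun sx => ofs+sx) (v sy) bw r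
  rw [hstep]
  exact foldl_set_block (fun sy row => (List.range bw).foldl (fun row sx => row.set (ofs+sx) (v sy sx)) row) [] bh k0 done rest h1 h2

lemma getD_map_range {β : Type} (g : Nat → β) (d : β) {i n : Nat} (h : i < n) :
    ((List.range n).map g).getD i d = g i := by
  rw [List.getD_eq_getElem _ _ (by simpa using h)]
  simp

lemma map_getD_range {α : Type} (l : List α) (d : α) :
    (List.range l.length).map (fun i => l.getD i d) = l := by
  apply List.ext_getElem (by simp)
  intro i h1 h2
  simp [List.getD, List.getElem?_eq_getElem h2]

lemma lx_fill (bw bh k0 : Nat) (w : Nat → Nat → Nat → Int) :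
    ∀ (cw : Nat) (done mid tail : List (List Int)), done.length = k0 → mid.length = bh →
    (List.range cw).foldl (fun r lx => (List.range bh).foldl (fun r sy => (List.range bw).foldl (fun r sx => r.set (k0+sy) ((r.getD (k0+sy) []).set (lx*bw+sx) (w lx sy sx))) r) r) (done ++ (mid ++ tail))
      = done ++ ((List.range bh).map (fun sy => (List.range cw).foldl (fun row lx => (List.range bw).foldl (fun row sx => row.set (lx*bw+sx) (w lx sy sx)) row) (mid.getD sy [])) ++ tail) := by
  intro cw
  induction cw with
  | zero =>
    intro done mid tail h1 h2
    simp only [List.range_zero, List.foldl_nil]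
    rw [← h2, map_getD_range]
  | succ cw ih =>
    intro done mid tail h1 h2
    rw [List.range_succ, List.foldl_append, ih done mid tail h1 h2]
    simp only [List.foldl_cons, List.foldl_nil]
    have hM : ((List.range bh).map (fun sy => (List.range cw).foldl (fun row lx => (List.range bw).foldl (fun row sx => row.set (lx*bw+sx) (w lx sy sx)) row) (mid.getD sy []))).length = bh := by simp
    have hrest : bh ≤ (((List.range bh).map (fun sy => (List.range cw).foldl (fun row lx => (List.range bw).foldl (fun row sx => row.set (lx*bw+sx) (w lx sy sx)) row) (mid.getD sy []))) ++ tail).length := by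
      simp
    have hs := sy_fill bw (cw*bw) k0 (fun sy sx => w cw sy sx) bh done _ h1 hrest
    beta_reduce at hs
    simp only [List.append_assoc] at hs ⊢
    rw [hs]
    have hmap : (List.range bh).map (fun sy => (List.range bw).foldl (fun row sx => row.set (cw*bw+sx) (w cw sy sx)) ((((List.range bh).map (fun sy => (List.range cw).foldl (fun row lx => (List.range bw).foldl (fun row sx => row.set (lx*bw+sx) (w lx sy sx)) row) (mid.getD sy []))) ++ tail).getD sy []))
        = (List.range bh).map (fun sy => (List.range cw ++ [cw]).foldl (fun row lx => (List.range bw).foldl (fun row sx => row.set (lx*bw+sx) (w lx sy sx)) row) (mid.getD sy [])) := by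
      apply List.map_congr_left
      intro sy hsy
      have hsy' : sy < bh := List.mem_range.mp hsy
      rw [List.getD_append _ _ _ _ (by simpa using hsy'), getD_map_range _ _ hsy',
          List.foldl_append]
      simp
    rw [hmap, List.drop_left' hM]

lemma ly_fill (bw bh cw : Nat) (w : Nat → Nat → Nat → Nat → Int) :
    ∀ (ch : Nat) (rest : List (List Int)), ch*bh ≤ rest.length →
    (List.range ch).foldl (fun r ly => (List.range cw).foldl (fun r lx => (List.range bh).foldl (fun r sy => (List.range bw).foldl (fun r sx => r.set (ly*bh+sy) ((r.getD (ly*bh+sy) []).set (lx*bw+sx) (w ly lx sy sx))) r) r) r) rest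
      = (List.range ch).flatMap (fun ly => (List.range bh).map (fun sy => (List.range cw).foldl (fun row lx => (List.range bw).foldl (fun row sx => row.set (lx*bw+sx) (w ly lx sy sx)) row) (rest.getD (ly*bh+sy) []))) ++ rest.drop (ch*bh) := by
  intro ch
  induction ch with
  | zero => intro rest h; simp
  | succ ch ih =>
    intro rest h
    have h' : ch*bh + bh ≤ rest.length := by rw [Nat.succ_mul] at h; exact h
    rw [List.range_succ, List.foldl_append, ih rest (by omega)]
    simp only [List.foldl_cons, List.foldl_nil]
    have hFMlen : ((List.range ch).flatMap (fun ly => (List.range bh).map (fun sy => (List.range cw).foldl (fun row lx => (List.range bw).foldl (fun row sx => row.set (lx*bw+sx) (w ly lx sy sx)) row) (rest.getD (ly*bh+sy) [])))).length = ch*bh :=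
      len_seg ch bh _
    have hsplit : rest.drop (ch*bh) = (rest.drop (ch*bh)).take bh ++ rest.drop (ch*bh + bh) := by
      conv_lhs => rw [← List.take_append_drop bh (rest.drop (ch*bh))]
      rw [List.drop_drop]
    rw [hsplit]
    have hmid : ((rest.drop (ch*bh)).take bh).length = bh := by
      rw [List.length_take, List.length_drop]; omega
    have hlx := lx_fill bw bh (ch*bh) (fun lx sy sx => w ch lx sy sx) cw _ _ (rest.drop (ch*bh + bh)) hFMlen hmid
    beta_reduce at hlx
    rw [hlx]
    have hmap : (List.range bh).map (fun sy => (List.range cw).foldl (fun row lx => (List.range bw).foldl (fun row sx => row.set (lx*bw+sx) (w ch lx sy sx)) row) (((rest.drop (ch*bh)).take bh).getD sy []))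
        = (List.range bh).map (fun sy => (List.range cw).foldl (fun row lx => (List.range bw).foldl (fun row sx => row.set (lx*bw+sx) (w ch lx sy sx)) row) (rest.getD (ch*bh+sy) [])) := by
      apply List.map_congr_left
      intro sy hsy
      have hsy' : sy < bh := List.mem_range.mp hsy
      congr 1
      simp [List.getD, hsy', List.getElem?_drop]
    rw [hmap]
    simp [List.flatMap_append, List.append_assoc, Nat.succ_mul]

lemma A_norm (carp base : List (List Int)) :
    recursive_carpet carp base =
    (List.range carp.length).flatMap (fun ly => (List.range base.length).map (fun sy =>
      (List.range (carp.headD []).length).flatMap (fun lx => (List.range (base.headD []).length).map (fun sx =>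
        (carpet_modify ((carp.getD ly []).getD lx 0) ((base.getD sy []).getD sx 0)).getD 0)))) := by
  have hly := ly_fill (base.headD []).length base.length (carp.headD []).length
    (fun ly lx sy sx => (carpet_modify ((carp.getD ly []).getD lx 0) ((base.getD sy []).getD sx 0)).getD 0)
    carp.length
    (List.replicate (base.length*carp.length) (List.replicate ((base.headD []).length*(carp.headD []).length) (0:Int)))
    (by simp [Nat.mul_comm])
  beta_reduce at hly
  show (List.range carp.length).foldl _ _ = _
  have hdrop : (List.replicate (base.length*carp.length) (List.replicate ((base.headD []).length*(carp.headD []).length) (0:Int))).drop (carp.length*base.length) = [] := by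
    simp [List.drop_replicate, Nat.mul_comm]
  rw [hly, hdrop, List.append_nil]
  apply List.flatMap_congr
  intro ly hly'
  have hly'' : ly < carp.length := List.mem_range.mp hly'
  apply List.map_congr_left
  intro sy hsy
  have hsy' : sy < base.length := List.mem_range.mp hsy
  have hidx : ly * base.length + sy < base.length * carp.length := by
    calc ly * base.length + sy < (ly+1) * base.length := by rw [Nat.succ_mul]; omega
    _ ≤ carp.length * base.length := Nat.mul_le_mul_right _ hly''
    _ = base.length * carp.length := Nat.mul_comm _ _
  rw [List.getD_replicate _ hidx]
  rw [row_fill _ _ _ _ (by simp [Nat.mul_comm])]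
  have hdrop2 : (List.replicate ((base.headD []).length*(carp.headD []).length) (0:Int)).drop ((carp.headD []).length*(base.headD []).length) = [] := by
    simp [List.drop_replicate, Nat.mul_comm]
  rw [hdrop2, List.append_nil]

lemma flatMap_getD_range {α β : Type} (d : α) (f : α → List β) :
    ∀ (xs : List α), xs.flatMap f = (List.range xs.length).flatMap (fun i => f (xs.getD i d)) := by
  intro xs
  induction xs with
  | nil => simp
  | cons x xs ih => simp [List.range_succ_eq_map, List.flatMap_map, ih]

-- B's two nested building loops equal one fold over the flattened modifier list.
lemma foldl2_eq_foldl_flatMap {α β γ : Type} (g : α → List β) (st : γ → β → γ) :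
    ∀ (l : List α) (d : γ),
    l.foldl (fun d x => (g x).foldl st d) d = (l.flatMap g).foldl st d := by
  intro l
  induction l with
  | nil => intro d; simp
  | cons x l ih => intro d; simp [List.flatMap_cons, List.foldl_append, ih]

-- Every value stored by the memoising fold is f of its key.
lemma memo_good (f : Int → List (List Int)) :
    ∀ (ks : List Int) (d : PySem.Dict Int (List (List Int))),
    (∀ k v, d.get? k = some v → v = f k) →
    ∀ k v, (ks.foldl (fun d k => if d.contains k then d else d.insert k (f k)) d).get? k = some v → v = f k := by
  intro ks
  induction ks with
  | nil => intro d hd; simpa using hd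
  | cons a ks ih =>
    intro d hd
    simp only [List.foldl_cons]
    apply ih
    intro k v hv
    by_cases hc : d.contains a
    · rw [if_pos hc] at hv; exact hd k v hv
    · rw [if_neg hc, PySem.Dict.get?_insert] at hv
      split at hv
      · rename_i hk; subst hk; exact (Option.some.injEq _ _ ▸ hv).symm ▸ rfl
      · exact hd k v hv

-- After the memoising fold, every processed key (and every pre-existing key) is present.
lemma memo_mem (f : Int → List (List Int)) :
    ∀ (ks : List Int) (d : PySem.Dict Int (List (List Int))) (k : Int),
    (d.contains k = true ∨ k ∈ ks) →
    (ks.foldl (fun d k => if d.contains k then d else d.insert k (f k)) d).contains k = true := by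
  intro ks
  induction ks with
  | nil => intro d k h; simpa using h.resolve_right (by simp)
  | cons a ks ih =>
    intro d k h
    simp only [List.foldl_cons]
    apply ih
    rcases h with h | h
    · left
      by_cases hc : d.contains a
      · rw [if_pos hc]; exact h
      · rw [if_neg hc, PySem.Dict.contains_insert, h, Bool.or_true]
    · rcases List.mem_cons.mp h with rfl | h
      · left
        by_cases hc : d.contains k
        · rw [if_pos hc]; exact hc
        · rw [if_neg hc]; exact PySem.Dict.contains_insert_self _ _ _
      · right; exact h

lemma memo_getD (f : Int → List (List Int)) (ks : List Int) (k : Int) (hk : k ∈ ks) :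
    ((ks.foldl (fun d k => if d.contains k then d else d.insert k (f k)) PySem.Dict.empty).getD k []) = f k := by
  have hc := memo_mem f ks PySem.Dict.empty k (Or.inr hk)
  rw [PySem.Dict.contains_eq_isSome_get?] at hc
  obtain ⟨v, hv⟩ := Option.isSome_iff_exists.mp hc
  have hgood := memo_good f ks PySem.Dict.empty (by intro k v h; simp [PySem.Dict.get?_empty] at h) k v hv
  rw [PySem.Dict.getD_eq_get?_getD, hv, Option.getD_some, hgood]

lemma getD_map_block {α β : Type} (g : α → β) (l : List α) (dα : α) (dβ : β) {i : Nat} (h : i < l.length) :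
    (l.map g).getD i dβ = g (l.getD i dα) := by
  rw [List.getD_eq_getElem _ _ (by simpa using h), List.getElem_map, List.getD_eq_getElem _ _ h]

lemma B_norm (carp base : List (List Int)) (hpre : Pre_recursive_carpet carp base) :
    recursive_carpet_alt carp base =
    (List.range carp.length).flatMap (fun ly => (List.range base.length).map (fun sy =>
      (List.range (carp.headD []).length).flatMap (fun lx => (List.range (base.headD []).length).map (fun sx =>
        (carpet_modify ((carp.getD ly []).getD lx 0) ((base.getD sy []).getD sx 0)).getD 0)))) := by
  obtain ⟨-, -, hcrow, -, -, -⟩ := hpre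
  show carp.flatMap _ = _
  rw [foldl2_eq_foldl_flatMap (fun crow => List.take (carp.headD []).length crow)
      (fun d mod => if d.contains mod = true then d
        else d.insert mod (buildBlock base (base.headD []).length mod)) carp PySem.Dict.empty]
  conv_lhs => rw [flatMap_getD_range ([] : List Int) _ carp]
  apply List.flatMap_congr
  intro ly hly
  have hly' : ly < carp.length := List.mem_range.mp hly
  apply List.map_congr_left
  intro sy hsy
  have hsy' : sy < base.length := List.mem_range.mp hsy
  have hmemrow : carp.getD ly [] ∈ carp := by
    rw [List.getD_eq_getElem _ _ hly']; exact List.getElem_mem _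
  have hlen : ((carp.getD ly []).take (carp.headD []).length).length = (carp.headD []).length := by
    rw [List.length_take]
    exact Nat.min_eq_left (hcrow _ hmemrow)
  conv_lhs => rw [flatMap_getD_range (0 : Int), hlen]
  apply List.flatMap_congr
  intro lx hlx
  have hlx' : lx < (carp.headD []).length := List.mem_range.mp hlx
  have hlx2 : lx < ((carp.getD ly []).take (carp.headD []).length).length := by
    rw [hlen]; exact hlx'
  have hlx3 : lx < (carp.getD ly []).length := lt_of_lt_of_le hlx' (hcrow _ hmemrow)
  have htake : ((carp.getD ly []).take (carp.headD []).length).getD lx 0 = (carp.getD ly []).getD lx 0 := by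
    rw [List.getD_eq_getElem _ _ hlx2, List.getD_eq_getElem _ _ hlx3, List.getElem_take]
  rw [htake]
  have hmemk : (carp.getD ly []).getD lx 0 ∈ carp.flatMap (fun crow => crow.take (carp.headD []).length) := by
    rw [List.mem_flatMap]
    refine ⟨carp.getD ly [], hmemrow, ?_⟩
    rw [← htake, List.getD_eq_getElem _ _ hlx2]
    exact List.getElem_mem _
  rw [memo_getD (buildBlock base (base.headD []).length) _ _ hmemk]
  unfold buildBlock
  rw [getD_map_block _ base [] [] hsy']

-- ===== VERDICT (by name: the statement is the Claim_ definition above) =====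
theorem recursive_carpet_spec : Claim_equal_recursive_carpet := by
  intro carp base _ hpre
  unfold Spec_recursive_carpet
  rw [A_norm, B_norm carp base hpre]
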